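-- pv_equiv track=rewrite | github.com/nexi-lab/nexus | src/nexus/utils/edit_engine.py | _middle_out_order
-- ===== SOURCE A (Python) =====
-- def _middle_out_order(
--
--     center: int,
--     total_lines: int,
--     window_size: int,
--     buffer: int,
-- ) -> list[int]:
--     """Generate search order expanding from center.
--
--     Example: center=50, buffer=5 → [50, 49, 51, 48, 52, 47, 53, ...]
--
--     Args:
--         center: Center line (0-indexed).
--         total_lines: Total number of lines.
--         window_size: Size of the match window.
--         buffer: Maximum distance from center to search.
--
--     Returns:
--         List of starting line indices in middle-out order.
--     """
--     max_start = total_lines - window_size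
--     if max_start < 0:
--         return []
--
--     # Clamp center to valid range
--     center = max(0, min(center, max_start))
--
--     result = [center]
--     for offset in range(1, buffer + 1):
--         if center - offset >= 0:
--             result.append(center - offset)
--         if center + offset <= max_start:
--             result.append(center + offset)
--
--     return result
-- ===== SOURCE B (Python) =====
-- def _middle_out_order(
--     center: int,
--     total_lines: int,
--     window_size: int,
--     buffer: int,
-- ) -> list[int]:
--     """Middle-out order via sort: one range + a distance key instead of an expanding loop."""
--     max_start = total_lines - window_size
--     if max_start < 0:
--         return []
--     center = max(0, min(center, max_start))
--     reach = max(buffer, 0)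
--     lo = max(0, center - reach)
--     hi = min(max_start, center + reach)
--     return sorted(range(lo, hi + 1), key=lambda i: 2 * abs(i - center) + (i > center))
-- ===== Notes on version B (the rewrite author's own statement) =====
-- stated objective: alternative
-- what changed: Replaces A's expanding offset loop (append center-k / center+k per offset) with building the clamped candidate range once and sorting it by the key 2*abs(i-center)+(i>center), which names the middle-out order directly.
import Mathlib
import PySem

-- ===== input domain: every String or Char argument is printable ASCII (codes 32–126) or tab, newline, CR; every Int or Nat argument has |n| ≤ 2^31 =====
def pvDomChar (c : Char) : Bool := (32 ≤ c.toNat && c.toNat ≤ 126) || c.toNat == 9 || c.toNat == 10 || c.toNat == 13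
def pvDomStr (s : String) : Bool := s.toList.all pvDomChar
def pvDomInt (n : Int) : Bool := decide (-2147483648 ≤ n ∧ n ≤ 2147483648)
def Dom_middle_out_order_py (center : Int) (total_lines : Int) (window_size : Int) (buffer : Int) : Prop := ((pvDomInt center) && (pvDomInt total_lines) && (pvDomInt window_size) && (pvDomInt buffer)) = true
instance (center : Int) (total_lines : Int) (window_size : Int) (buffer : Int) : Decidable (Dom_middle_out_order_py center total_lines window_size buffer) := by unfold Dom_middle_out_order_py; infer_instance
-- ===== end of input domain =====

-- B replaces A's expanding append loop by one clamped range sorted with a distance-from-center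
-- key (alternative decomposition; same result, cost differs only by the sort).

-- ===== PORT A =====
def middle_out_order_py (center : Int) (total_lines : Int) (window_size : Int) (buffer : Int) : List Int :=
  let max_start := total_lines - window_size
  if max_start < 0 then []
  else
    let c := max 0 (min center max_start)
    (PySem.List.pyRange 1 (buffer + 1) 1).foldl
      (fun result offset =>
        let result := if c - offset ≥ 0 then result ++ [c - offset] else result
        if c + offset ≤ max_start then result ++ [c + offset] else result)
      [c]

-- ===== PORT B =====
def middle_out_order_py_alt (center : Int) (total_lines : Int) (window_size : Int) (buffer : Int) : List Int :=
  let max_start := total_lines - window_size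
  if max_start < 0 then []
  else
    let c := max 0 (min center max_start)
    let reach := max buffer 0
    let lo := max 0 (c - reach)
    let hi := min max_start (c + reach)
    PySem.List.sorted (PySem.List.pyRange lo (hi + 1) 1)
      (fun i => 2 * |i - c| + (if i > c then 1 else 0)) false

-- ===== PRECONDITION & SPEC =====
def Spec_middle_out_order_py (center : Int) (total_lines : Int) (window_size : Int) (buffer : Int) (out : List Int) : Prop := out = middle_out_order_py_alt center total_lines window_size buffer
instance (center : Int) (total_lines : Int) (window_size : Int) (buffer : Int) (out : List Int) : Decidable (Spec_middle_out_order_py center total_lines window_size buffer out) := by unfold Spec_middle_out_order_py; infer_instance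

-- ===== CLAIM (what is proved, stated in full; the proofs are below) =====
def Claim_equal_middle_out_order_py : Prop := ∀ (center : Int) (total_lines : Int) (window_size : Int) (buffer : Int), Dom_middle_out_order_py center total_lines window_size buffer → Spec_middle_out_order_py center total_lines window_size buffer (middle_out_order_py center total_lines window_size buffer)

-- ===== LEMMAS AND PROOFS =====

-- A's loop unrolled over the offset count n (proof-only helper).
def pvALoop (c m : Int) : Nat → List Int
  | 0 => [c]
  | n+1 =>
    let r := pvALoop c m n
    let r := if c - ((n : Int) + 1) ≥ 0 then r ++ [c - ((n : Int) + 1)] else r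
    if c + ((n : Int) + 1) ≤ m then r ++ [c + ((n : Int) + 1)] else r

-- B's sort key (proof-only abbreviation).
def pvKey (c i : Int) : Int := 2 * |i - c| + (if i > c then 1 else 0)

lemma pvFoldl_eq_aLoop (c m : Int) (n : Nat) :
    (PySem.List.pyRange 1 ((n : Int) + 1) 1).foldl
      (fun result offset =>
        let result := if c - offset ≥ 0 then result ++ [c - offset] else result
        if c + offset ≤ m then result ++ [c + offset] else result)
      [c] = pvALoop c m n := by
  induction n with
  | zero => simp [pvALoop]
  | succ n ih =>
    have h : (1 : Int) ≤ (n : Int) + 1 := by omega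
    have hcast : (((n : Nat) + 1 : Nat) : Int) + 1 = ((n : Int) + 1) + 1 := by push_cast; ring
    rw [hcast, PySem.List.pyRange_one_succ_right h, List.foldl_append, ih]
    simp only [List.foldl_cons, List.foldl_nil]
    rfl

-- Main invariant: A's partial list is a strictly key-increasing rearrangement of the
-- clamped radius-n range around c.
lemma pvALoop_spec (c m : Int) (hc : 0 ≤ c) (hcm : c ≤ m) (n : Nat) :
    (pvALoop c m n).Perm (PySem.List.pyRange (max 0 (c - (n : Int))) (min m (c + (n : Int)) + 1) 1)
    ∧ (pvALoop c m n).Pairwise (fun a b => pvKey c a < pvKey c b) := by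
  induction n with
  | zero =>
    refine ⟨?_, by simp [pvALoop]⟩
    have h1 : max 0 (c - ((0:Nat) : Int)) = c := by push_cast; omega
    have h2 : min m (c + ((0:Nat) : Int)) = c := by push_cast; omega
    rw [h1, h2, PySem.List.pyRange_one_cons (by omega)]
    have : PySem.List.pyRange (c + 1) (c + 1) 1 = [] := by
      simp
    rw [this]
    simp [pvALoop]
  | succ n ih =>
    obtain ⟨hperm, hpw⟩ := ih
    have hmem : ∀ x ∈ pvALoop c m n, max 0 (c - (n : Int)) ≤ x ∧ x ≤ min m (c + (n : Int)) := by
      intro x hx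
      have := (hperm.mem_iff).mp hx
      rw [PySem.List.mem_pyRange_one] at this
      omega
    have hkey_bound : ∀ x ∈ pvALoop c m n, pvKey c x ≤ 2 * (n : Int) + 1 := by
      intro x hx
      obtain ⟨hx1, hx2⟩ := hmem x hx
      have habs : |x - c| ≤ (n : Int) := abs_le.mpr ⟨by omega, by omega⟩
      unfold pvKey
      split_ifs <;> omega
    have hkeyL : pvKey c (c - ((n : Int) + 1)) = 2 * ((n : Int) + 1) := by
      unfold pvKey
      rw [abs_of_nonpos (by omega)]
      split_ifs with h
      · omega
      · ring
    have hkeyR : pvKey c (c + ((n : Int) + 1)) = 2 * ((n : Int) + 1) + 1 := by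
      unfold pvKey
      rw [abs_of_nonneg (by omega)]
      split_ifs with h
      · ring
      · omega
    have hcastlo : c - (((n : Nat) + 1 : Nat) : Int) = c - ((n : Int) + 1) := by push_cast; ring
    have hcasthi : c + (((n : Nat) + 1 : Nat) : Int) = c + ((n : Int) + 1) := by push_cast; ring
    by_cases h1 : c - ((n : Int) + 1) ≥ 0 <;> by_cases h2 : c + ((n : Int) + 1) ≤ m
    · -- both sides appended
      have hstep : pvALoop c m (n+1)
          = pvALoop c m n ++ [c - ((n : Int) + 1)] ++ [c + ((n : Int) + 1)] := by
        simp [pvALoop, h2, show ((n : Int) < c) by omega]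
      have hlo : max 0 (c - ((n : Int) + 1)) = max 0 (c - (n : Int)) - 1 := by omega
      have hhi : min m (c + ((n : Int) + 1)) = min m (c + (n : Int)) + 1 := by omega
      constructor
      · rw [hstep, hcastlo, hcasthi, hlo, hhi]
        rw [PySem.List.pyRange_one_cons (by omega)]
        rw [show max 0 (c - (n : Int)) - 1 + 1 = max 0 (c - (n : Int)) by ring]
        rw [show min m (c + (n : Int)) + 1 + 1 = (min m (c + (n : Int)) + 1) + 1 by ring]
        rw [PySem.List.pyRange_one_succ_right (show max 0 (c - (n : Int)) ≤ min m (c + (n : Int)) + 1 by omega)]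
        have hL : c - ((n : Int) + 1) = max 0 (c - (n : Int)) - 1 := by omega
        have hR : c + ((n : Int) + 1) = min m (c + (n : Int)) + 1 := by omega
        rw [hL, hR]
        have p1 : ((pvALoop c m n ++ [max 0 (c - (n : Int)) - 1]) ++ [min m (c + (n : Int)) + 1]).Perm
            ((max 0 (c - (n : Int)) - 1) :: pvALoop c m n ++ [min m (c + (n : Int)) + 1]) :=
          (List.perm_append_singleton _ _).append_right _
        have p2 : ((max 0 (c - (n : Int)) - 1) :: (pvALoop c m n ++ [min m (c + (n : Int)) + 1])).Perm
            ((max 0 (c - (n : Int)) - 1) :: (PySem.List.pyRange (max 0 (c - (n : Int))) (min m (c + (n : Int)) + 1) 1 ++ [min m (c + (n : Int)) + 1])) :=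
          (hperm.append_right _).cons _
        exact p1.trans p2
      · rw [hstep]
        rw [List.pairwise_append, List.pairwise_append]
        refine ⟨⟨hpw, by simp, ?_⟩, by simp, ?_⟩
        · intro a ha b hb
          simp at hb; subst hb
          have := hkey_bound a ha
          omega
        · intro a ha b hb
          simp at hb; subst hb
          rcases List.mem_append.mp ha with h | h
          · have := hkey_bound a h; omega
          · simp at h; subst h; omega
    · -- only lower side appended
      have hstep : pvALoop c m (n+1) = pvALoop c m n ++ [c - ((n : Int) + 1)] := by
        simp [pvALoop, h2, show ((n : Int) < c) by omega]
      have hlo : max 0 (c - ((n : Int) + 1)) = max 0 (c - (n : Int)) - 1 := by omega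
      have hhi : min m (c + ((n : Int) + 1)) = min m (c + (n : Int)) := by omega
      constructor
      · rw [hstep, hcastlo, hcasthi, hlo, hhi]
        rw [PySem.List.pyRange_one_cons (by omega)]
        rw [show max 0 (c - (n : Int)) - 1 + 1 = max 0 (c - (n : Int)) by ring]
        have hL : c - ((n : Int) + 1) = max 0 (c - (n : Int)) - 1 := by omega
        rw [hL]
        exact (List.perm_append_singleton _ _).trans (hperm.cons _)
      · rw [hstep, List.pairwise_append]
        refine ⟨hpw, by simp, ?_⟩
        intro a ha b hb
        simp at hb; subst hb
        have := hkey_bound a ha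
        omega
    · -- only upper side appended
      have hstep : pvALoop c m (n+1) = pvALoop c m n ++ [c + ((n : Int) + 1)] := by
        simp [pvALoop, h2, show ¬((n : Int) < c) by omega]
      have hlo : max 0 (c - ((n : Int) + 1)) = max 0 (c - (n : Int)) := by omega
      have hhi : min m (c + ((n : Int) + 1)) = min m (c + (n : Int)) + 1 := by omega
      constructor
      · rw [hstep, hcastlo, hcasthi, hlo, hhi]
        rw [show min m (c + (n : Int)) + 1 + 1 = (min m (c + (n : Int)) + 1) + 1 by ring]
        rw [PySem.List.pyRange_one_succ_right (show max 0 (c - (n : Int)) ≤ min m (c + (n : Int)) + 1 by omega)]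
        have hR : c + ((n : Int) + 1) = min m (c + (n : Int)) + 1 := by omega
        rw [hR]
        exact hperm.append_right _
      · rw [hstep, List.pairwise_append]
        refine ⟨hpw, by simp, ?_⟩
        intro a ha b hb
        simp at hb; subst hb
        have := hkey_bound a ha
        omega
    · -- nothing appended
      have hstep : pvALoop c m (n+1) = pvALoop c m n := by
        simp [pvALoop, h2, show ¬((n : Int) < c) by omega]
      have hlo : max 0 (c - ((n : Int) + 1)) = max 0 (c - (n : Int)) := by omega
      have hhi : min m (c + ((n : Int) + 1)) = min m (c + (n : Int)) := by omega
      rw [hstep, hcastlo, hcasthi, hlo, hhi]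
      exact ⟨hperm, hpw⟩

-- ===== VERDICT (by name: the statement is the Claim_ definition above) =====
theorem middle_out_order_py_spec : Claim_equal_middle_out_order_py := by
  intro center total_lines window_size buffer _
  unfold Spec_middle_out_order_py middle_out_order_py middle_out_order_py_alt
  set m := total_lines - window_size with hm
  by_cases hneg : m < 0
  · simp [hneg]
  · simp only [hneg, if_false]
    set c := max 0 (min center m) with hcdef
    have hc : 0 ≤ c := by omega
    have hcm : c ≤ m := by omega
    set n := buffer.toNat with hn
    have hreach : max buffer 0 = (n : Int) := by rw [hn]; omega
    have hrange : PySem.List.pyRange 1 (buffer + 1) 1 = PySem.List.pyRange 1 ((n : Int) + 1) 1 := by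
      rw [PySem.List.pyRange_one, PySem.List.pyRange_one]
      congr 2
      omega
    rw [hrange, pvFoldl_eq_aLoop c m n, hreach]
    obtain ⟨hperm, hpw⟩ := pvALoop_spec c m hc hcm n
    exact (PySem.List.sorted_eq_of_perm_of_pairwise_lt _ _ _ hperm
      (by simpa [pvKey] using hpw)).symm
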